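-- pv_equiv track=rewrite | github.com/pypi-data/pypi-mirror-389 | packages/atlas-quantum/atlas_quantum-0.6.3-py3-none-any.whl/atlas_q/coherence/utils.py | qubit_wise_commute
-- ===== SOURCE A (Python) =====
-- def qubit_wise_commute(pauli1: str, pauli2: str) -> bool:
--     """
--     Check if two Pauli strings are qubit-wise commuting (QWC).
--
--     Two Paulis are QWC if at each qubit position, they either:
--     - Both act with I
--     - Both act with Z
--     - Both act with X or Y
--
--     This is a stronger condition than general commutativity and is
--     used for measurement grouping.
--
--     Args:
--         pauli1: First Pauli string
--         pauli2: Second Pauli string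
--
--     Returns:
--         True if Pauli strings are qubit-wise commuting
--
--     Raises:
--         ValueError: If Pauli strings have different lengths
--
--     Example:
--         >>> qubit_wise_commute('IXZY', 'IZZY')
--         True
--         >>> qubit_wise_commute('IXZY', 'IXYX')
--         True
--         >>> qubit_wise_commute('IXZ', 'IZX')
--         False
--
--     Notes:
--         - QWC grouping enables simultaneous measurement in the same basis
--         - (I, Z) form one measurement family (Z-basis)
--         - (X, Y) form another measurement family (rotated basis)
--     """
--     if len(pauli1) != len(pauli2):
--         raise ValueError(
--             f"Pauli strings must have same length, got {len(pauli1)} and {len(pauli2)}"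
--         )
--
--     # Define measurement families
--     z_family = {'I', 'Z'}
--     xy_family = {'X', 'Y'}
--
--     for p1, p2 in zip(pauli1, pauli2):
--         # Check if both in same family
--         both_z = (p1 in z_family) and (p2 in z_family)
--         both_xy = (p1 in xy_family) and (p2 in xy_family)
--
--         if not (both_z or both_xy):
--             return False
--
--     return True
-- ===== SOURCE B (Python) =====
-- BASIS = {'I': 'Z', 'Z': 'Z', 'X': 'X', 'Y': 'X'}
--
--
-- def qubit_wise_commute(pauli1: str, pauli2: str) -> bool:
--     if len(pauli1) != len(pauli2):
--         raise ValueError(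
--             f"Pauli strings must have same length, got {len(pauli1)} and {len(pauli2)}"
--         )
--     try:
--         b1 = ''.join(BASIS[c] for c in pauli1)
--         b2 = ''.join(BASIS[c] for c in pauli2)
--     except KeyError:
--         return False
--     return b1 == b2
-- ===== Notes on version B (the rewrite author's own statement) =====
-- stated objective: simpler
-- what changed: Replaces the per-position early-exit two-family membership loop by a transform-then-compare decomposition: each string is canonicalised to its measurement-basis string via a dict (KeyError on an unrecognised character returns False, as in A), then the two basis strings are compared for equality.
import Mathlib
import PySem

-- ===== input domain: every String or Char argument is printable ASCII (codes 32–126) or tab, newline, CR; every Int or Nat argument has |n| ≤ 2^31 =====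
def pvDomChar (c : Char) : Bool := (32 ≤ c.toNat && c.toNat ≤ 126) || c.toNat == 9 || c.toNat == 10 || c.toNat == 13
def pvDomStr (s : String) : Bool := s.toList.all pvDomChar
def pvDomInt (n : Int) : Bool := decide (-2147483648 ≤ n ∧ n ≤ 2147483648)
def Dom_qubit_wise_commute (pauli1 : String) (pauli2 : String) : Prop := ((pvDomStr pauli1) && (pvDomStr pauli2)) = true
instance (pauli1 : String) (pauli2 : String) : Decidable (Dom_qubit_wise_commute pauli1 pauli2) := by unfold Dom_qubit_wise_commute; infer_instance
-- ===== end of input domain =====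

-- B replaces A's early-exit two-family membership loop by a transform-then-compare
-- decomposition (canonicalise each string to its measurement basis, then one equality);
-- objective: simpler. Equivalence is about the return value on equal-length inputs.

-- ===== PORT A =====
def pvZFamily : PySem.Set Char := PySem.Set.ofList ['I', 'Z']
def pvXYFamily : PySem.Set Char := PySem.Set.ofList ['X', 'Y']

-- the 'for p1, p2 in zip(...)' loop with its early 'return False'
def pvLoopA : List (Char × Char) → Bool
  | [] => true
  | (p1, p2) :: rest =>
    let both_z := PySem.Set.contains pvZFamily p1 && PySem.Set.contains pvZFamily p2
    let both_xy := PySem.Set.contains pvXYFamily p1 && PySem.Set.contains pvXYFamily p2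
    if !(both_z || both_xy) then false else pvLoopA rest

def qubit_wise_commute (pauli1 : String) (pauli2 : String) : Bool :=
  -- length-mismatch ValueError is excluded by Pre_
  pvLoopA (pauli1.toList.zip pauli2.toList)

-- ===== PORT B =====
def pvBASIS : PySem.Dict Char Char :=
  PySem.Dict.ofList [('I', 'Z'), ('Z', 'Z'), ('X', 'X'), ('Y', 'X')]

-- ''.join(BASIS[c] for c in s); none = KeyError
def pvMapBasis? : List Char → Option (List Char)
  | [] => some []
  | c :: cs =>
    match PySem.Dict.get? pvBASIS c with
    | none => none
    | some b => (pvMapBasis? cs).map (b :: ·)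

def qubit_wise_commute_alt (pauli1 : String) (pauli2 : String) : Bool :=
  -- length-mismatch ValueError is excluded by Pre_
  match pvMapBasis? pauli1.toList with
  | none => false          -- except KeyError: return False
  | some b1 =>
    match pvMapBasis? pauli2.toList with
    | none => false
    | some b2 => b1 == b2

-- ===== PRECONDITION & SPEC =====
-- Pre_ excludes exactly the inputs where A raises ValueError: unequal lengths.
def Pre_qubit_wise_commute (pauli1 : String) (pauli2 : String) : Prop :=
  pauli1.toList.length = pauli2.toList.length
instance (pauli1 : String) (pauli2 : String) : Decidable (Pre_qubit_wise_commute pauli1 pauli2) := by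
  unfold Pre_qubit_wise_commute; infer_instance
def pvWitness_qubit_wise_commute : String × String := ("IXZY", "IZZY")

def Spec_qubit_wise_commute (pauli1 : String) (pauli2 : String) (out : Bool) : Prop := out = qubit_wise_commute_alt pauli1 pauli2
instance (pauli1 : String) (pauli2 : String) (out : Bool) : Decidable (Spec_qubit_wise_commute pauli1 pauli2 out) := by unfold Spec_qubit_wise_commute; infer_instance

-- ===== CLAIM (what is proved, stated in full; the proofs are below) =====
def Claim_equal_qubit_wise_commute : Prop := ∀ (pauli1 : String) (pauli2 : String), Dom_qubit_wise_commute pauli1 pauli2 → Pre_qubit_wise_commute pauli1 pauli2 → Spec_qubit_wise_commute pauli1 pauli2 (qubit_wise_commute pauli1 pauli2)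

-- ===== LEMMAS AND PROOFS =====

-- B's dict lookup, characterised per character
lemma pvBASIS_get (c : Char) :
    PySem.Dict.get? pvBASIS c =
      if c = 'I' then some 'Z' else if c = 'Z' then some 'Z'
      else if c = 'X' then some 'X' else if c = 'Y' then some 'X' else none := by
  have hmk : pvBASIS = PySem.Dict.mk [('I', 'Z'), ('Z', 'Z'), ('X', 'X'), ('Y', 'X')] := by
    decide
  rw [hmk]
  simp only [PySem.Dict.get?_mk_cons]
  by_cases h1 : c = 'I' <;> by_cases h2 : c = 'Z' <;> by_cases h3 : c = 'X'
    <;> by_cases h4 : c = 'Y' <;> subst_vars <;> simp_all [PySem.Dict.get?]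
  rw [if_neg (fun h => h1 h.symm), if_neg (fun h => h2 h.symm), if_neg (fun h => h3 h.symm),
    if_neg (fun h => h4 h.symm)]

-- the core equivalence, on the underlying char lists of equal length
lemma pvLoop_eq (cs ds : List Char) (h : cs.length = ds.length) :
    pvLoopA (cs.zip ds) =
      (match pvMapBasis? cs with
       | none => false
       | some b1 =>
         match pvMapBasis? ds with
         | none => false
         | some b2 => b1 == b2) := by
  induction cs generalizing ds with
  | nil =>
    cases ds with
    | nil => simp [pvLoopA, pvMapBasis?]
    | cons d ds => simp at h
  | cons c cs ih =>
    cases ds with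
    | nil => simp at h
    | cons d ds =>
      simp only [List.length_cons, Nat.succ.injEq] at h
      have ihds := ih ds h
      simp only [List.zip_cons_cons, pvLoopA, pvMapBasis?, pvBASIS_get]
      by_cases hc1 : c = 'I' <;> by_cases hc2 : c = 'Z' <;> by_cases hc3 : c = 'X'
        <;> by_cases hc4 : c = 'Y'
        <;> by_cases hd1 : d = 'I' <;> by_cases hd2 : d = 'Z' <;> by_cases hd3 : d = 'X'
        <;> by_cases hd4 : d = 'Y'
        <;> subst_vars <;> simp_all [pvZFamily, pvXYFamily, PySem.Set.contains]
        <;> (try cases pvMapBasis? cs) <;> (try cases pvMapBasis? ds) <;> simp_all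

-- ===== VERDICT (by name: the statement is the Claim_ definition above) =====
theorem qubit_wise_commute_spec : Claim_equal_qubit_wise_commute := by
  intro p1 p2 _ hpre
  unfold Spec_qubit_wise_commute qubit_wise_commute qubit_wise_commute_alt
  exact pvLoop_eq p1.toList p2.toList hpre
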